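-- pv_equiv track=rewrite | github.com/Elvis-codeur/Analys | Files/open.py | csv_read
-- ===== SOURCE A (Python) =====
-- def csv_read(text):
--     last = -1
--     result = []
--     columnCount = 0
--     for i in range(len(text)):
--         if(text[i] == ","):
--             columnCount = columnCount + 1
--             result.append([])
--         elif text[i] == "\n":
--             columnCount = columnCount + 1
--             result.append([])
--             break
--
--     i = 0
--     u = 0
--     while i < len(text):
--         if(text[i]== ","or text[i] == "\n"):
--             result[u].append(text[last+1:i])
--             u = u + 1
--             if(u > columnCount-1):
--                 u = 0
--
--             last = i
--         i = i + 1
--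
--
--     return result
-- ===== SOURCE B (Python) =====
-- def csv_read(text):
--     nl = text.find("\n")
--     columnCount = text[:nl].count(",") + 1 if nl != -1 else text.count(",")
--     fields = text.replace("\n", ",").split(",")[:-1]
--     return [fields[j::columnCount] for j in range(columnCount)]
-- ===== Notes on version B (the rewrite author's own statement) =====
-- stated objective: simpler
-- what changed: Replaces A's two index-manipulating loops (manual separator scan with slice bookkeeping and a wrap-around round-robin scatter into pre-built empty columns) by three string-method one-liners: the column count from find/count, the flat field list from replace/split, and the columns by stride slicing fields[j::columnCount].
import Mathlib
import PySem

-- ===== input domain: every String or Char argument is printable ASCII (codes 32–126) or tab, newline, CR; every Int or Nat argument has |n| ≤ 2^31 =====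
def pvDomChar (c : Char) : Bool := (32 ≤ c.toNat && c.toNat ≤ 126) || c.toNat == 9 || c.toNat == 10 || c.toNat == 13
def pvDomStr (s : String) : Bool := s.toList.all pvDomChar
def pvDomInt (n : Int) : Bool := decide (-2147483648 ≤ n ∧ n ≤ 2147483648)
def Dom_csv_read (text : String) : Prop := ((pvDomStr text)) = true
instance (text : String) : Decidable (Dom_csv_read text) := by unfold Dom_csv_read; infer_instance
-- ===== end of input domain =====

-- B parses the CSV with string methods (find/count, replace/split, stride slices) instead of
-- A's two index-manipulating loops; same return value (no argument is mutated by either).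

-- ===== PORT A =====
-- first for-loop of A: count separators up to and including the first newline, appending [] each time
def csvLoop1 : List Char → Int × List (List String) → Int × List (List String)
  | [], st => st
  | c :: rest, (cc, res) =>
    if c = ',' then csvLoop1 rest (cc + 1, res ++ [[]])
    else if c = '\n' then (cc + 1, res ++ [[]])       -- break
    else csvLoop1 rest (cc, res)

-- second while-loop of A: scatter each field text[last+1:i] round-robin into result.
-- result[u].append(...) is ported as List.modify; u is provably a valid index whenever the
-- branch is reached (columnCount ≥ 1 then), so this is exact.
def csvLoop2 (cs : List Char) (columnCount : Int) (i : Nat) (last u : Int)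
    (res : List (List String)) : List (List String) :=
  if h : i < cs.length then
    if cs[i] = ',' ∨ cs[i] = '\n' then
      let res' := res.modify u.toNat
        (· ++ [String.ofList (PySem.List.slice cs (some (last + 1)) (some (i : Int)))])
      let u' := u + 1
      csvLoop2 cs columnCount (i + 1) (i : Int) (if u' > columnCount - 1 then 0 else u') res'
    else
      csvLoop2 cs columnCount (i + 1) last u res
  else res
termination_by cs.length - i

def csv_read (text : String) : List (List String) :=
  let cs := text.toList
  let st := csvLoop1 cs (0, [])
  csvLoop2 cs st.1 0 (-1) 0 st.2

-- ===== PORT B =====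
def csv_read_alt (text : String) : List (List String) :=
  let cs := text.toList
  let nl := PySem.Chars.find cs ['\n']
  let columnCount : Nat :=
    if nl ≠ -1 then PySem.Chars.count (PySem.List.slice cs none (some nl)) [','] + 1
    else PySem.Chars.count cs [',']
  let fields : List String :=
    PySem.List.slice
      (((PySem.Chars.split? (PySem.Chars.replace cs ['\n'] [',']) [',']).getD []).map
        String.ofList)
      none (some (-1))
  (List.range columnCount).map (fun (j : Nat) =>
    (PySem.List.slice? fields (some ((j : Nat) : Int)) none ((columnCount : Nat) : Int)).getD [])

-- ===== PRECONDITION & SPEC =====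
def Spec_csv_read (text : String) (out : List (List String)) : Prop := out = csv_read_alt text
instance (text : String) (out : List (List String)) : Decidable (Spec_csv_read text out) := by unfold Spec_csv_read; infer_instance

-- ===== CLAIM (what is proved, stated in full; the proofs are below) =====
def Claim_equal_csv_read : Prop := ∀ (text : String), Dom_csv_read text → Spec_csv_read text (csv_read text)

-- ===== LEMMAS AND PROOFS =====

-- a separator character of A (comma or newline)
def psep (c : Char) : Bool := c = ',' || c = '\n'

-- split on psep, keeping the trailing segment (what str.split produces)
def splitK (acc : List Char) : List Char → List (List Char)
  | [] => [acc]
  | c :: t => if psep c then acc :: splitK [] t else splitK (acc ++ [c]) t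

-- split on psep, dropping the trailing segment (A's fields = splitK minus its last piece)
def splitF (acc : List Char) : List Char → List (List Char)
  | [] => []
  | c :: t => if psep c then acc :: splitF [] t else splitF (acc ++ [c]) t

-- A's round-robin scatter, extracted from csvLoop2 verbatim
def rr (cc : Int) (res : List (List String)) (u : Int) : List String → List (List String)
  | [] => res
  | f :: fs =>
    rr cc (res.modify u.toNat (· ++ [f])) (if u + 1 > cc - 1 then 0 else u + 1) fs

-- every cc-th element starting at the head
def everyNth {α : Type} (cc : Nat) : List α → List α
  | [] => []
  | x :: r => x :: everyNth cc (r.drop (cc - 1))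
termination_by l => l.length
decreasing_by simp

-- elements of fs at positions ≡ j (counting down, restarting at cc - 1)
def colTake (cc : Nat) : Nat → List String → List String
  | _, [] => []
  | j, f :: fs => if j = 0 then f :: colTake cc (cc - 1) fs else colTake cc (j - 1) fs

-- distance from u forward to idx modulo cc, written without %
def rrDist (cc u idx : Nat) : Nat := if u ≤ idx then idx - u else cc + idx - u

-- A's column count, structurally
def nSeps (cs : List Char) : Nat :=
  if '\n' ∈ cs then (cs.takeWhile (· ≠ '\n')).count ',' + 1 else cs.count ','

-- newline replaced by comma (what B's text.replace does per character)
def nlc (c : Char) : Char := if c = '\n' then ',' else c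

theorem splitK_map_nlc (cs : List Char) : ∀ acc, splitK acc (cs.map nlc) = splitK acc cs := by
  induction cs with
  | nil => intro acc; simp [splitK]
  | cons c t ih =>
    intro acc
    by_cases h : psep c = true
    · have h2 : psep (nlc c) = true := by
        simp [psep, nlc] at h ⊢; rcases h with h | h <;> simp [h]
      simp [splitK, h, h2, ih]
    · have h2 : nlc c = c := by simp [psep] at h; simp [nlc, h.2]
      simp [splitK, h2, h, ih]

theorem splitK_ne_nil (cs : List Char) : ∀ acc, splitK acc cs ≠ [] := by
  induction cs with
  | nil => intro acc; simp [splitK]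
  | cons c t ih => intro acc; by_cases h : psep c = true <;> simp [splitK, h, ih]

theorem splitK_dropLast (cs : List Char) : ∀ acc, (splitK acc cs).dropLast = splitF acc cs := by
  induction cs with
  | nil => intro acc; simp [splitK, splitF]
  | cons c t ih =>
    intro acc
    by_cases h : psep c = true
    · simp [splitK, splitF, h, List.dropLast_cons_of_ne_nil (splitK_ne_nil t [])]
      exact ih []
    · simp [splitK, splitF, h, ih]

theorem take_idxOf (cs : List Char) : cs.take (cs.idxOf '\n') = cs.takeWhile (· ≠ '\n') := by
  induction cs with
  | nil => simp
  | cons c t ih =>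
    by_cases h : c = '\n'
    · simp [h, List.idxOf_cons]
    · simpa [List.idxOf_cons, h, List.takeWhile_cons] using ih

theorem splitF_nil_of_no_sep (cs : List Char) : ∀ acc, (∀ c ∈ cs, psep c = false) → splitF acc cs = [] := by
  induction cs with
  | nil => intro _ _; simp [splitF]
  | cons c t ih =>
    intro acc h
    have hc := h c (by simp)
    simp [splitF, hc]
    exact ih _ (fun x hx => h x (by simp [hx]))

theorem csvLoop1_eq (cs : List Char) : ∀ (cc : Int) (res : List (List String)),
    csvLoop1 cs (cc, res) = (cc + nSeps cs, res ++ List.replicate (nSeps cs) []) := by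
  induction cs with
  | nil => intro cc res; simp [csvLoop1, nSeps]
  | cons c t ih =>
    intro cc res
    by_cases hn : c = '\n'
    · simp [csvLoop1, hn, nSeps, List.replicate_succ]
    · by_cases hc : c = ','
      · have : c ≠ '\n' := hn
        simp [csvLoop1, hc, ih, nSeps, List.takeWhile_cons]
        by_cases hm : '\n' ∈ t <;>
          simp [hm, List.count_cons, List.replicate_succ, List.replicate_succ'] <;> ring_nf <;> simp [List.append_assoc]
      · simp [csvLoop1, hc, hn, ih, nSeps, List.takeWhile_cons, List.count_cons]
        by_cases hm : '\n' ∈ t <;> simp [hm, Ne.symm hn]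

theorem colTake_everyNth (cc : Nat) (l : List String) : ∀ (j : Nat),
    colTake cc j l = everyNth cc (l.drop j) := by
  induction l with
  | nil => intro j; simp [colTake, everyNth]
  | cons f fs ih =>
    intro j
    by_cases hj : j = 0
    · simp [colTake, hj, everyNth, ih]
    · rw [show (f :: fs).drop j = fs.drop (j-1) by cases j with | zero => omega | succ n => simp]
      simp [colTake, hj, ih]

theorem rr_length (cc : Int) (fs : List String) : ∀ (res : List (List String)) (u : Int),
    (rr cc res u fs).length = res.length := by
  induction fs with
  | nil => intro res u; simp [rr]
  | cons f fs ih => intro res u; simp [rr, ih]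

theorem rr_getElem (cc : Nat) (fs : List String) : ∀ (res : List (List String)) (u : Nat)
    (_ : res.length = cc) (_ : u < cc) (j : Nat) (hj : j < res.length),
    (rr (cc : Int) res (u : Int) fs)[j]?
      = some (res[j] ++ colTake cc (rrDist cc u j) fs) := by
  induction fs with
  | nil =>
    intro res u hres hu j hj
    simp [rr, colTake, List.getElem?_eq_getElem hj]
  | cons f fs ih =>
    intro res u hres hu j hj
    have htoNat : ((u : Int)).toNat = u := by simp
    by_cases hwrap : (u : Int) + 1 > (cc : Int) - 1
    · have hu1 : u + 1 = cc := by omega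
      have hstep : rr (cc:Int) res (u:Int) (f :: fs)
          = rr (cc:Int) (res.modify u (· ++ [f])) ((0:Nat):Int) fs := by
        simp [rr, hwrap, htoNat]
      rw [hstep, ih (res.modify u (· ++ [f])) 0 (by simp [hres]) (by omega) j (by simpa using hj)]
      simp only [List.getElem_modify, hj]
      by_cases hju : j = u
      · rw [show rrDist cc 0 j = j by simp [rrDist], show rrDist cc u j = 0 by simp [rrDist, hju]]
        simp [colTake, hju, show u = cc - 1 by omega]
      · rw [if_neg (fun h => hju h.symm)]
        rw [show rrDist cc 0 j = j by simp [rrDist]]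
        have hne : rrDist cc u j ≠ 0 := by simp [rrDist]; split <;> omega
        rw [show colTake cc (rrDist cc u j) (f :: fs) = colTake cc (rrDist cc u j - 1) fs by
          simp [colTake, hne]]
        have : j = rrDist cc u j - 1 := by simp [rrDist]; split <;> omega
        rw [← this]
    · have hu1 : u + 1 < cc := by omega
      have hstep : rr (cc:Int) res (u:Int) (f :: fs)
          = rr (cc:Int) (res.modify u (· ++ [f])) (((u+1:Nat)):Int) fs := by
        simp [rr, hwrap, htoNat]
      rw [hstep, ih (res.modify u (· ++ [f])) (u+1) (by simp [hres]) (by omega) j (by simpa using hj)]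
      simp only [List.getElem_modify, hj]
      by_cases hju : j = u
      · rw [show rrDist cc (u+1) j = cc - 1 by simp [rrDist, hju]; omega,
            show rrDist cc u j = 0 by simp [rrDist, hju]]
        simp [colTake, hju]
      · rw [if_neg (fun h => hju h.symm)]
        have hne : rrDist cc u j ≠ 0 := by simp [rrDist]; split <;> omega
        rw [show colTake cc (rrDist cc u j) (f :: fs) = colTake cc (rrDist cc u j - 1) fs by
          simp [colTake, hne]]
        have : rrDist cc (u+1) j = rrDist cc u j - 1 := by simp [rrDist]; split <;> split <;> omega
        rw [this]

theorem count_go_comma (cs : List Char) : ∀ (fuel acc : Nat), cs.length ≤ fuel →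
    PySem.Chars.count.go [','] fuel cs acc = acc + cs.count ',' := by
  induction cs with
  | nil => intro fuel acc h; cases fuel <;> simp [PySem.Chars.count.go]
  | cons c t ih =>
    intro fuel acc h
    cases fuel with
    | zero => simp at h
    | succ f =>
      by_cases hc : c = ','
      · simp [PySem.Chars.count.go, hc, List.isPrefixOf, ih f (acc+1) (by simpa using h), List.count_cons]
        omega
      · have : List.isPrefixOf [','] (c :: t) = false := by
          simp [List.isPrefixOf]; exact fun h => absurd h.symm hc
        simp [PySem.Chars.count.go, this, ih f acc (by simpa using h), List.count_cons, hc]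

theorem count_comma (cs : List Char) : PySem.Chars.count cs [','] = cs.count ',' := by
  simp [PySem.Chars.count]
  simpa using count_go_comma cs cs.length 0 le_rfl

theorem find_go_newline (cs : List Char) : ∀ (k : Nat),
    PySem.Chars.find.go ['\n'] cs k
      = if '\n' ∈ cs then ((k + cs.idxOf '\n' : Nat) : Int) else -1 := by
  induction cs with
  | nil => intro k; simp [PySem.Chars.find.go]
  | cons c t ih =>
    intro k
    by_cases hc : c = '\n'
    · simp [PySem.Chars.find.go, hc, List.isPrefixOf]
    · have hpre : List.isPrefixOf ['\n'] (c :: t) = false := by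
        simp [List.isPrefixOf]; exact fun h => absurd h.symm hc
      simp only [PySem.Chars.find.go, hpre]
      rw [ih (k+1)]
      simp [List.idxOf_cons, hc, Ne.symm hc]
      by_cases hm : '\n' ∈ t <;> simp [hm]
      push_cast; omega

theorem find_newline (cs : List Char) :
    PySem.Chars.find cs ['\n'] = if '\n' ∈ cs then (cs.idxOf '\n' : Int) else -1 := by
  simp [PySem.Chars.find]
  rw [find_go_newline cs 0]
  simp

theorem replace_go_newline (cs : List Char) : ∀ (fuel : Nat) (acc : List Char), cs.length ≤ fuel →
    PySem.Chars.replace.go ['\n'] [','] fuel cs acc = acc.reverse ++ cs.map nlc := by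
  induction cs with
  | nil => intro fuel acc h; cases fuel <;> simp [PySem.Chars.replace.go]
  | cons c t ih =>
    intro fuel acc h
    cases fuel with
    | zero => simp at h
    | succ f =>
      by_cases hc : c = '\n'
      · simp [PySem.Chars.replace.go, hc, List.isPrefixOf, ih f _ (by simpa using h), nlc]
      · have hpre : List.isPrefixOf ['\n'] (c :: t) = false := by
          simp [List.isPrefixOf]; exact fun h => absurd h.symm hc
        simp [PySem.Chars.replace.go, hpre, ih f _ (by simpa using h), nlc, hc]

theorem replace_newline (cs : List Char) :
    PySem.Chars.replace cs ['\n'] [','] = cs.map nlc := by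
  simp [PySem.Chars.replace]
  rw [replace_go_newline cs cs.length [] le_rfl]
  simp

theorem splitOn_go_comma (cs : List Char) : ∀ (fuel : Nat) (cur : List Char)
    (acc : List (List Char)), cs.length < fuel → '\n' ∉ cs →
    PySem.Chars.splitOn.go [','] fuel cs cur acc
      = acc.reverse ++ splitK cur.reverse cs := by
  induction cs with
  | nil =>
    intro fuel cur acc h _
    cases fuel with
    | zero => simp at h
    | succ f => simp [PySem.Chars.splitOn.go, splitK]
  | cons c t ih =>
    intro fuel cur acc h hn
    cases fuel with
    | zero => simp at h
    | succ f =>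
      by_cases hc : c = ','
      · simp [PySem.Chars.splitOn.go, hc, List.isPrefixOf,
          ih f [] (cur.reverse :: acc) (by simpa using h) (by simp at hn; exact hn.2),
          splitK, psep]
      · have hpre : List.isPrefixOf [','] (c :: t) = false := by
          simp [List.isPrefixOf]; exact fun h => absurd h.symm hc
        have hcn : c ≠ '\n' := by simp at hn; exact fun h => hn.1 h.symm
        simp [PySem.Chars.splitOn.go, hpre,
          ih f (c :: cur) acc (by simpa using h) (by simp at hn; exact hn.2),
          splitK, psep, hc, hcn]

theorem splitOn_comma (cs : List Char) (hn : '\n' ∉ cs) :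
    PySem.Chars.splitOn cs [','] = splitK [] cs := by
  have := splitOn_go_comma cs (cs.length + 1) [] [] (by omega) hn
  simpa [PySem.Chars.splitOn] using this

theorem stride_aux {α : Type} (xs : List α) (cc : Nat) (hcc : 0 < cc) : ∀ (m j : Nat),
    xs.length - j = m →
    (List.range (if j < xs.length then (xs.length - j - 1)/cc + 1 else 0)).filterMap
        (fun (k : Nat) => xs[(((j:Int)) + (cc:Int) * ((k:Nat):Int)).toNat]?)
      = everyNth cc (xs.drop j) := by
  intro m
  induction m using Nat.strong_induction_on with
  | _ m ih =>
    intro j hm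
    by_cases hj : j < xs.length
    · have hdrop : xs.drop j = xs[j] :: xs.drop (j + 1) := List.drop_eq_getElem_cons hj
      rw [if_pos hj, List.range_succ_eq_map, List.filterMap_cons, List.filterMap_map]
      have h0 : xs[(((j:Int)) + (cc:Int) * (((0:Nat):Nat):Int)).toNat]? = some xs[j] := by
        simp [List.getElem?_eq_getElem hj]
      rw [h0]
      have hcomp : ((fun (k:Nat) => xs[(((j:Int)) + (cc:Int) * ((k:Nat):Int)).toNat]?) ∘ Nat.succ)
          = fun (k:Nat) => xs[((((j+cc:Nat)):Int) + (cc:Int) * ((k:Nat):Int)).toNat]? := by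
        funext k
        simp only [Function.comp]
        congr 2
        push_cast
        ring_nf
      rw [hcomp]
      have hrec := ih (xs.length - (j + cc)) (by omega) (j + cc) rfl
      have hcnt : (xs.length - j - 1)/cc
          = if j + cc < xs.length then (xs.length - (j+cc) - 1)/cc + 1 else 0 := by
        by_cases h2 : j + cc < xs.length
        · rw [if_pos h2, show xs.length - j - 1 = (xs.length - (j+cc) - 1) + cc by omega,
            Nat.add_div_right _ hcc]
        · rw [if_neg h2]
          exact Nat.div_eq_of_lt (by omega)
      rw [hcnt, hrec, hdrop, everyNth, List.drop_drop,
        show j + 1 + (cc - 1) = j + cc by omega]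
    · rw [if_neg hj, List.drop_eq_nil_of_le (by omega)]
      simp [everyNth]

theorem slice?_stride {α : Type} (xs : List α) (j cc : Nat) (hcc : 0 < cc) :
    (PySem.List.slice? xs (some (j : Int)) none (cc : Int)).getD []
      = everyNth cc (xs.drop j) := by
  rw [PySem.List.slice?, if_neg (by exact_mod_cast hcc.ne')]
  have hlt : ¬ ((cc:Int) < 0) := by omega
  have hjlt : ¬ ((j:Int) < 0) := by omega
  simp only [PySem.List.sliceIndices, hlt, if_false, hjlt]
  have hpos : (0:Int) < (cc:Int) := by exact_mod_cast hcc
  simp only [if_pos hpos, Option.getD_some]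
  rw [← stride_aux xs cc hcc (xs.length - j) j rfl]
  by_cases hj : j < xs.length
  · have hmin : min ((j:Int)) ((xs.length:Int)) = (j:Int) := by
      rw [min_eq_left]; exact_mod_cast hj.le
    rw [hmin, if_pos hj]
    have hslt : ((j:Int)) < (xs.length:Int) := by exact_mod_cast hj
    rw [if_pos hslt]
    congr 1
    have h1 : ((xs.length:Int)) - j + cc - 1 = (((xs.length - j - 1 + cc : Nat)):Int) := by
      push_cast; omega
    rw [h1, show ((xs.length - j - 1 + cc : Nat):Int) / (cc:Int)
        = (((xs.length - j - 1 + cc)/cc : Nat) : Int) by exact_mod_cast rfl,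
      Int.toNat_natCast, Nat.add_div_right _ hcc]
  · have hmin : min ((j:Int)) ((xs.length:Int)) = (xs.length:Int) := by
      rw [min_eq_right]; exact_mod_cast (by omega : xs.length ≤ j)
    rw [hmin, if_neg hj, if_neg (by omega)]
    simp

theorem csvLoop2_eq (cc : Int) (rest : List Char) : ∀ (pre : List Char) (d : Nat) (u : Int)
    (res : List (List String)), d ≤ pre.length →
    csvLoop2 (pre ++ rest) cc pre.length ((d : Int) - 1) u res
      = rr cc res u ((splitF (pre.drop d) rest).map String.ofList) := by
  induction rest with
  | nil =>
    intro pre d u res hd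
    rw [csvLoop2]
    simp [splitF, rr]
  | cons c t ih =>
    intro pre d u res hd
    have hi : pre.length < (pre ++ c :: t).length := by simp
    have hget : (pre ++ c :: t)[pre.length]'hi = c := by
      rw [List.getElem_append_right le_rfl]
      simp
    have hsl : PySem.List.slice (pre ++ c :: t) (some ((d:Int) - 1 + 1)) (some (pre.length : Int))
        = pre.drop d := by
      rw [show (d:Int) - 1 + 1 = (d:Int) by ring, PySem.List.slice_natCast]
      rw [List.drop_append_of_le_length hd]
      rw [show (pre.drop d ++ c :: t).take (pre.length - d)
          = (pre.drop d ++ c :: t).take (pre.drop d).length by rw [List.length_drop]]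
      exact List.take_left
    by_cases hs : psep c = true
    · have hor : ((pre ++ c :: t)[pre.length]'hi = ',' ∨ (pre ++ c :: t)[pre.length]'hi = '\n') := by
        rw [hget]; simpa [psep] using hs
      rw [csvLoop2, dif_pos hi, if_pos hor]
      simp only [hsl]
      have := ih (pre ++ [c]) (pre.length + 1) (if u + 1 > cc - 1 then 0 else u + 1)
        (res.modify u.toNat (· ++ [String.ofList (pre.drop d)])) (by simp)
      rw [show pre ++ c :: t = (pre ++ [c]) ++ t by simp] at *
      rw [show pre.length + 1 = (pre ++ [c]).length by simp] at *
      rw [show ((pre.length : Int)) = (((pre ++ [c]).length : Nat) : Int) - 1 by simp]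
      rw [this]
      rw [show ((pre ++ [c]).drop (pre ++ [c]).length) = ([] : List Char) by simp]
      simp only [splitF, hs, if_pos, List.map_cons]
      rw [rr]
    · have hor : ¬ ((pre ++ c :: t)[pre.length]'hi = ',' ∨ (pre ++ c :: t)[pre.length]'hi = '\n') := by
        rw [hget]; simpa [psep] using hs
      rw [csvLoop2, dif_pos hi, if_neg hor]
      have := ih (pre ++ [c]) d u res (by simp; omega)
      rw [show pre ++ c :: t = (pre ++ [c]) ++ t by simp] at *
      rw [show pre.length + 1 = (pre ++ [c]).length by simp] at *
      rw [this]
      rw [show (pre ++ [c]).drop d = pre.drop d ++ [c] from List.drop_append_of_le_length hd]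
      simp only [splitF, hs, if_neg]
      simp [hs]

-- no separator characters at all means no fields and no columns
theorem nSeps_zero_no_sep (cs : List Char) (h : nSeps cs = 0) : ∀ c ∈ cs, psep c = false := by
  intro c hc
  unfold nSeps at h
  by_cases hm : '\n' ∈ cs
  · simp [hm] at h
  · rw [if_neg hm] at h
    have : c ≠ ',' := by
      intro hc'; subst hc'
      exact absurd (List.count_pos_iff.mpr hc) (by omega)
    have : c ≠ '\n' := fun hc' => hm (hc' ▸ hc)
    simp [psep, *]

-- the map nlc image never contains a newline
theorem no_newline_map_nlc (cs : List Char) : '\n' ∉ cs.map nlc := by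
  intro h
  rcases List.mem_map.mp h with ⟨c, _, hc⟩
  by_cases h' : c = '\n' <;> simp [nlc, h'] at hc

-- A's side, fully characterised
theorem csv_read_eq (text : String) :
    csv_read text = rr ((nSeps text.toList : Nat) : Int)
      (List.replicate (nSeps text.toList) []) 0
      ((splitF [] text.toList).map String.ofList) := by
  show csvLoop2 text.toList (csvLoop1 text.toList (0, [])).1 0 (-1) 0
      (csvLoop1 text.toList (0, [])).2 = _
  rw [csvLoop1_eq]
  have := csvLoop2_eq ((0:Int) + (nSeps text.toList : Nat)) text.toList [] 0 0
    (([] : List (List String)) ++ List.replicate (nSeps text.toList) []) (by simp)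
  simpa using this

-- B's side, fully characterised
theorem csv_read_alt_eq (text : String) :
    csv_read_alt text = (List.range (nSeps text.toList)).map
      (fun j => everyNth (nSeps text.toList)
        (((splitF [] text.toList).map String.ofList).drop j)) := by
  show (List.range (if PySem.Chars.find text.toList ['\n'] ≠ -1 then
        PySem.Chars.count (PySem.List.slice text.toList none
          (some (PySem.Chars.find text.toList ['\n']))) [','] + 1
      else PySem.Chars.count text.toList [','])).map (fun (j : Nat) =>
    (PySem.List.slice? (PySem.List.slice
      (((PySem.Chars.split? (PySem.Chars.replace text.toList ['\n'] [',']) [',']).getD []).map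
        String.ofList) none (some (-1))) (some ((j : Nat) : Int)) none
      (((if PySem.Chars.find text.toList ['\n'] ≠ -1 then
        PySem.Chars.count (PySem.List.slice text.toList none
          (some (PySem.Chars.find text.toList ['\n']))) [','] + 1
      else PySem.Chars.count text.toList [',']) : Nat) : Int)).getD []) = _
  have hcc : (if PySem.Chars.find text.toList ['\n'] ≠ -1 then
        PySem.Chars.count (PySem.List.slice text.toList none
          (some (PySem.Chars.find text.toList ['\n']))) [','] + 1
      else PySem.Chars.count text.toList [',']) = nSeps text.toList := by
    rw [find_newline]
    by_cases hm : '\n' ∈ text.toList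
    · rw [if_pos hm, if_pos (by omega), PySem.List.slice_to_natCast,
        take_idxOf, count_comma, nSeps, if_pos hm]
    · rw [if_neg hm]
      simp only [ne_eq, not_true_eq_false, if_false, count_comma, nSeps, if_neg hm]
  rw [hcc]
  have hfields : PySem.List.slice
      (((PySem.Chars.split? (PySem.Chars.replace text.toList ['\n'] [',']) [',']).getD []).map
        String.ofList) none (some (-1))
      = (splitF [] text.toList).map String.ofList := by
    rw [replace_newline, PySem.Chars.split?]
    simp only [List.isEmpty_cons, Option.getD_some, if_false]
    rw [splitOn_comma _ (no_newline_map_nlc text.toList), splitK_map_nlc,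
      PySem.List.slice_to_neg_one]
    simp only [Bool.false_eq_true, if_false, Option.getD_some]
    rw [← List.map_dropLast, splitK_dropLast]
  rw [hfields]
  refine List.map_congr_left (fun j hj => ?_)
  have hjlt : j < nSeps text.toList := List.mem_range.mp hj
  exact slice?_stride _ j _ (by omega)

-- ===== VERDICT (by name: the statement is the Claim_ definition above) =====
theorem csv_read_spec : Claim_equal_csv_read := by
  intro text _
  unfold Spec_csv_read
  rw [csv_read_eq, csv_read_alt_eq]
  set cs := text.toList with hcs
  set cc := nSeps cs with hccdef
  set fs := (splitF [] cs).map String.ofList with hfs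
  by_cases hcc0 : cc = 0
  · rw [hcc0]
    have : splitF [] cs = [] := splitF_nil_of_no_sep cs [] (nSeps_zero_no_sep cs hcc0)
    simp [rr, hfs, this]
  · apply List.ext_getElem?
    intro j
    by_cases hj : j < cc
    · have hres : (List.replicate cc ([] : List String)).length = cc := by simp
      rw [show (0:Int) = ((0:Nat):Int) by simp,
        rr_getElem cc fs (List.replicate cc []) 0 hres (by omega) j (by simpa using hj)]
      rw [List.getElem?_map, List.getElem?_range hj]
      simp only [Option.map_some]
      rw [List.getElem_replicate, colTake_everyNth,
        show rrDist cc 0 j = j by simp [rrDist]]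
      simp
    · rw [List.getElem?_eq_none_iff.mpr (by rw [rr_length]; simpa using not_lt.mp hj),
        List.getElem?_eq_none_iff.mpr (by simpa using not_lt.mp hj)]
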